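-- pv_equiv track=rewrite | github.com/Eulala/BugFixEfficiency | BugFixEfficiency/bug_fix_efficiency_classify.py | calculate_sequence_length
-- ===== SOURCE A (Python) =====
-- bots = { 'tensorflowbutler', 'google-ml-butler', 'tensorflow-bot' }
--
-- def calculate_sequence_length(sequence):
--     last_human_activity = 0
--     for i in range(len(sequence) - 1, -1, -1):
--         if 'actor' in sequence[i] and sequence[i]['actor'] in bots:
--             continue
--         elif 'author' in sequence[i] and sequence[i]['author'] in bots:
--             continue
--         last_human_activity = i
--         break
--     return last_human_activity+1
-- ===== SOURCE B (Python) =====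
-- bots = { 'tensorflowbutler', 'google-ml-butler', 'tensorflow-bot' }
--
-- def _is_bot(entry):
--     return ('actor' in entry and entry['actor'] in bots) or \
--            ('author' in entry and entry['author'] in bots)
--
-- def calculate_sequence_length(sequence):
--     indices = [i for i, e in enumerate(sequence) if not _is_bot(e)]
--     return indices[-1] + 1 if indices else 1
-- ===== Notes on version B (the rewrite author's own statement) =====
-- stated objective: simpler
-- what changed: Replaces A's reverse index loop with break/continue and a mutable last_human_activity by an is_bot predicate plus a forward comprehension collecting non-bot indices, returning last index + 1 (or 1 if none).
import Mathlib
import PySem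

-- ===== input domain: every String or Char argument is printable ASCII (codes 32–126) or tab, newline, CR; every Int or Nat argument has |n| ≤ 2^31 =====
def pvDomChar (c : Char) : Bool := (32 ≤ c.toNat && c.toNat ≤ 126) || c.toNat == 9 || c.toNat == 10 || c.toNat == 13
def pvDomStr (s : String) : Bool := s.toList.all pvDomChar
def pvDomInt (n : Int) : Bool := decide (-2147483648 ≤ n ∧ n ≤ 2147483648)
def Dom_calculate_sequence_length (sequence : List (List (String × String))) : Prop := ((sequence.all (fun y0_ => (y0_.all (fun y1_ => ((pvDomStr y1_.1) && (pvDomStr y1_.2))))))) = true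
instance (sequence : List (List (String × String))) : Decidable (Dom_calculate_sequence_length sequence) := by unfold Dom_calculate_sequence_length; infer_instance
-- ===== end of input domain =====

-- B replaces A's reverse break/continue loop by an is_bot predicate and a forward
-- comprehension of non-bot indices (objective: simpler decomposition; same cost).

-- ===== PORT A =====
def pvBots : List String := ["tensorflowbutler", "google-ml-butler", "tensorflow-bot"]

-- 'k in d' / 'd[k]' on a Python dict, ported as first-match lookup on the association list (exact)
def pvLookup (d : List (String × String)) (k : String) : Option String :=
  (d.find? (fun p => p.1 == k)).map (·.2)

-- A's 'for i in range(len(sequence)-1, -1, -1)' loop with continue/break;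
-- returning from [] is falling off the loop with last_human_activity = 0
def calcA_loop (sequence : List (List (String × String))) : List Int → Int
  | [] => 0
  | i :: rest =>
    match PySem.List.pyGet? sequence i with
    | none => 0   -- unreachable: every i produced by the range is in bounds
    | some e =>
      if (match pvLookup e "actor" with | some v => pvBots.contains v | none => false) then
        calcA_loop sequence rest          -- continue
      else if (match pvLookup e "author" with | some v => pvBots.contains v | none => false) then
        calcA_loop sequence rest          -- continue
      else i                              -- last_human_activity = i; break

def calculate_sequence_length (sequence : List (List (String × String))) : Int :=
  calcA_loop sequence (PySem.List.pyRange ((sequence.length : Int) - 1) (-1) (-1)) + 1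

-- ===== PORT B =====
def pvIsBot (e : List (String × String)) : Bool :=
  (match pvLookup e "actor" with | some v => pvBots.contains v | none => false)
  || (match pvLookup e "author" with | some v => pvBots.contains v | none => false)

def calculate_sequence_length_alt (sequence : List (List (String × String))) : Int :=
  let indices := ((PySem.List.enumerate sequence).filter (fun p => !pvIsBot p.2)).map (·.1)
  -- 'indices[-1] + 1 if indices else 1' ('indices[-1]' exists iff indices is nonempty)
  match PySem.List.pyGet? indices (-1) with
  | some i => i + 1
  | none => 1

-- ===== PRECONDITION & SPEC =====
def Spec_calculate_sequence_length (sequence : List (List (String × String))) (out : Int) : Prop := out = calculate_sequence_length_alt sequence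
instance (sequence : List (List (String × String))) (out : Int) : Decidable (Spec_calculate_sequence_length sequence out) := by unfold Spec_calculate_sequence_length; infer_instance

-- ===== CLAIM (what is proved, stated in full; the proofs are below) =====
def Claim_equal_calculate_sequence_length : Prop := ∀ (sequence : List (List (String × String))), Dom_calculate_sequence_length sequence → Spec_calculate_sequence_length sequence (calculate_sequence_length sequence)

-- ===== LEMMAS AND PROOFS =====

-- if-continue chain = single disjunctive test (used to relate A's branch order to is_bot)
theorem pv_ite_chain (c1 c2 : Bool) (L n : Int) :
    (if c1 then L else if c2 then L else n) + 1 = if c1 || c2 then L + 1 else n + 1 := by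
  cases c1 <;> cases c2 <;> simp

-- A's loop only inspects the list through pyGet? at the visited indices
theorem calcA_loop_congr (s1 s2 : List (List (String × String))) (l : List Int)
    (h : ∀ i ∈ l, PySem.List.pyGet? s1 i = PySem.List.pyGet? s2 i) :
    calcA_loop s1 l = calcA_loop s2 l := by
  induction l with
  | nil => rfl
  | cons i rest ih =>
    simp only [calcA_loop, h i (List.mem_cons_self ..)]
    have := ih (fun j hj => h j (List.mem_cons_of_mem _ hj))
    cases PySem.List.pyGet? s2 i with
    | none => rfl
    | some e => simp [this]

theorem calcA_append (s : List (List (String × String))) (x : List (String × String)) :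
    calculate_sequence_length (s ++ [x]) =
      if pvIsBot x then calcA_loop s (PySem.List.pyRange ((s.length : Int) - 1) (-1) (-1)) + 1
      else (s.length : Int) + 1 := by
  unfold calculate_sequence_length
  have hlen : ((s ++ [x]).length : Int) - 1 = (s.length : Int) := by simp
  rw [hlen, PySem.List.pyRange_neg_one_cons (by omega)]
  have hget : PySem.List.pyGet? (s ++ [x]) (s.length : Int) = some x := by
    simp
  have hcongr : calcA_loop (s ++ [x]) (PySem.List.pyRange ((s.length : Int) - 1) (-1) (-1))
      = calcA_loop s (PySem.List.pyRange ((s.length : Int) - 1) (-1) (-1)) := by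
    apply calcA_loop_congr
    intro i hi
    rw [PySem.List.mem_pyRange_neg_one] at hi
    have h0 : 0 ≤ i := by omega
    have hlt : i.toNat < s.length := by omega
    have hi' : i = (i.toNat : Int) := (Int.toNat_of_nonneg h0).symm
    rw [hi', PySem.List.pyGet?_natCast, PySem.List.pyGet?_natCast,
      List.getElem?_append_left hlt]
  simp only [calcA_loop, hget]
  rw [hcongr]
  exact pv_ite_chain _ _ _ _

theorem calcB_append (s : List (List (String × String))) (x : List (String × String)) :
    calculate_sequence_length_alt (s ++ [x]) =
      if pvIsBot x then calculate_sequence_length_alt s else (s.length : Int) + 1 := by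
  unfold calculate_sequence_length_alt
  rw [PySem.List.enumerate_append]
  simp only [List.filter_append, List.map_append]
  have hsing : PySem.List.enumerate [x] (0 + s.length) = [((s.length : Int), x)] := by
    simp [PySem.List.enumerate_cons, PySem.List.enumerate_nil]
  rw [hsing]
  cases hb : pvIsBot x with
  | true => simp [hb]
  | false =>
    simp only [List.filter_cons, hb, Bool.not_false, if_pos, List.filter_nil, List.map_cons,
      List.map_nil]
    rw [PySem.List.pyGet?_neg_one_append_singleton]
    simp

theorem main_eq (s : List (List (String × String))) :
    calculate_sequence_length s = calculate_sequence_length_alt s := by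
  induction s using List.reverseRecOn with
  | nil => decide
  | append_singleton s x ih =>
    rw [calcA_append, calcB_append]
    cases hb : pvIsBot x with
    | true => simpa [hb, calculate_sequence_length] using ih
    | false => simp

-- ===== VERDICT (by name: the statement is the Claim_ definition above) =====
theorem calculate_sequence_length_spec : Claim_equal_calculate_sequence_length := by
  intro s _
  exact main_eq s
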